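-- pv_equiv track=rewrite | github.com/sagar189202115/python_practice | sagar/base6.py | getBaseTen
-- ===== SOURCE A (Python) =====
-- def getBaseTen(binaryVal):
--     count = 0
--
-- 	#reverse the string
--
--
--     #go through the list and get the value of all 1's
--     for i in range(0, len(binaryVal)):
--         if(binaryVal[i]):
--             count += 2**i
--     temp=count
--     c=0
--     base6=[]
--     i=1
--     while temp>0:
--         base6.append(temp%6)
--         #rem=(temp%6)*i
--         #i*=10
--         #c+=rem
--         temp=temp//6
--
--     return base6
-- ===== SOURCE B (Python) =====
-- def getBaseTen(binaryVal):
--     # Horner over the reversed bit list (doubling accumulator, no 2**i powers)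
--     count = 0
--     for b in reversed(binaryVal):
--         count = count * 2 + (1 if b else 0)
--     # count how many base-6 digits by growing a power, then extract each digit
--     # positionally in one closed-form comprehension (no repeated-division state loop)
--     k = 0
--     p = 1
--     while p <= count:
--         p *= 6
--         k += 1
--     return [count // 6 ** j % 6 for j in range(k)]
-- ===== Notes on version B (the rewrite author's own statement) =====
-- stated objective: alternative
-- what changed: Phase 1 replaces the positional count += 2**i sum over range(len) with Horner's doubling accumulator over the reversed list; phase 2 replaces A's repeated-division append loop with a staged construction: first count the number of base-6 digits by growing a power of 6, then emit every digit with the closed-form count // 6**j % 6 in one comprehension.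
import Mathlib
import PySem

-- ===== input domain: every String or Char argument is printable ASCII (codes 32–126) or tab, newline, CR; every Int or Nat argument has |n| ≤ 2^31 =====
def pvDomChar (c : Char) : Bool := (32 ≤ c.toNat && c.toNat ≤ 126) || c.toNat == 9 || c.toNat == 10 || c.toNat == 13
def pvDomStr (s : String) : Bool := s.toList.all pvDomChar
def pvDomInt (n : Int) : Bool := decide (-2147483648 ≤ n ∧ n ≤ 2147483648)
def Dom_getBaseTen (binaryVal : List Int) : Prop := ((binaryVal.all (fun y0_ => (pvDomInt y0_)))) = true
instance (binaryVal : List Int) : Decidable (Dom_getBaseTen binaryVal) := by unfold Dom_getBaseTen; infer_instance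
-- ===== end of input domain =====

-- B replaces A's positional 2**i sum with Horner over the reversed list, and replaces A's
-- repeated-division append loop by a staged pass: count the number of base-6 digits by
-- growing a power of 6, then extract every digit positionally in one closed-form map
-- (alternative decomposition; no speed claim).

-- ===== PORT A =====
-- A's while loop: append temp%6, temp //= 6, while temp > 0 (list appended at the back)
def pvLoopA (temp : Int) (base6 : List Int) : List Int :=
  if h : 0 < temp then
    pvLoopA (PySem.Int.floordiv temp 6) (base6 ++ [PySem.Int.mod temp 6])
  else base6
termination_by temp.toNat
decreasing_by
  rw [PySem.Int.floordiv_eq_ediv_of_pos (by omega : (0:Int) < 6)]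
  have h1 := Int.ediv_add_emod temp 6
  have h2 : 0 ≤ temp % 6 := Int.emod_nonneg temp (by omega)
  have h3 : temp % 6 < 6 := Int.emod_lt_of_pos temp (by omega)
  omega

def getBaseTen (binaryVal : List Int) : List Int :=
  -- for i in range(0, len(binaryVal)): if binaryVal[i]: count += 2**i
  let count := (PySem.List.pyRange 0 (binaryVal.length : Int) 1).foldl
    (fun c i => if PySem.List.pyGetD binaryVal i 0 ≠ 0 then c + 2 ^ i.toNat else c) 0
  pvLoopA count []

-- ===== PORT B =====
-- Source B's digit-count loop 'while p <= count: p *= 6; k += 1'; the running power p = 6^e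
-- is carried as its exponent e (the same value), which also gives the termination measure
def pvCountDigits (n : Int) (e : Nat) (k : Int) : Int :=
  if h : (6:Int) ^ e ≤ n then pvCountDigits n (e + 1) (k + 1) else k
termination_by (n + 1 - 6 ^ e).toNat
decreasing_by
  have h1 : (6:Int) ^ (e + 1) = 6 * 6 ^ e := by ring
  have h2 : (1:Int) ≤ 6 ^ e := one_le_pow₀ (by norm_num)
  omega

def getBaseTen_alt (binaryVal : List Int) : List Int :=
  -- count = 0; for b in reversed(binaryVal): count = count*2 + (1 if b else 0)
  let count := binaryVal.reverse.foldl (fun c b => c * 2 + (if b ≠ 0 then 1 else 0)) 0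
  -- k = 0; p = 1; while p <= count: p *= 6; k += 1
  let k := pvCountDigits count 0 0
  -- [count // 6**j % 6 for j in range(k)]
  (PySem.List.pyRange 0 k 1).map
    (fun j => PySem.Int.mod (PySem.Int.floordiv count ((6:Int) ^ j.toNat)) 6)

-- ===== PRECONDITION & SPEC =====
def Spec_getBaseTen (binaryVal : List Int) (out : List Int) : Prop := out = getBaseTen_alt binaryVal
instance (binaryVal : List Int) (out : List Int) : Decidable (Spec_getBaseTen binaryVal out) := by unfold Spec_getBaseTen; infer_instance

-- ===== CLAIM (what is proved, stated in full; the proofs are below) =====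
def Claim_equal_getBaseTen : Prop := ∀ (binaryVal : List Int), Dom_getBaseTen binaryVal → Spec_getBaseTen binaryVal (getBaseTen binaryVal)

-- ===== LEMMAS AND PROOFS =====

-- common value of the bit list (little-endian)
def pvVal : List Int → Int
  | [] => 0
  | x :: xs => (if x ≠ 0 then 1 else 0) + 2 * pvVal xs

-- A's count loop, generalized over accumulator and exponent offset
theorem pvCountA_gen (l : List Int) : ∀ (c : Int) (w : Nat),
    (List.range l.length).foldl
      (fun a k => if l.getD k 0 ≠ 0 then a + 2 ^ (k + w) else a) c
      = c + 2 ^ w * pvVal l := by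
  induction l with
  | nil => intro c w; simp [pvVal]
  | cons x xs ih =>
    intro c w
    rw [List.length_cons, List.range_succ_eq_map, List.foldl_cons, List.foldl_map]
    have : (List.range xs.length).foldl
        (fun a k => if (x :: xs).getD (k + 1) 0 ≠ 0 then a + 2 ^ (k + 1 + w) else a)
        (if (x :: xs).getD 0 0 ≠ 0 then c + 2 ^ (0 + w) else c)
        = (List.range xs.length).foldl
        (fun a k => if xs.getD k 0 ≠ 0 then a + 2 ^ (k + (w + 1)) else a)
        (if x ≠ 0 then c + 2 ^ w else c) := by
      simp only [List.getD_cons_succ, List.getD_cons_zero, Nat.zero_add]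
      congr 1
      funext a k
      have he : k + 1 + w = k + (w + 1) := by omega
      rw [he]
    rw [this, ih]
    simp only [pvVal]
    split_ifs <;> ring

-- B's Horner loop over the reversed list
theorem pvHorner (l : List Int) : ∀ (c : Int),
    l.reverse.foldl (fun a b => a * 2 + (if b ≠ 0 then 1 else 0)) c
      = c * 2 ^ l.length + pvVal l := by
  induction l with
  | nil => intro c; simp [pvVal]
  | cons x xs ih =>
    intro c
    rw [List.reverse_cons, List.foldl_append]
    simp only [List.foldl_cons, List.foldl_nil, ih, pvVal, List.length_cons]
    ring

-- both counts equal pvVal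
theorem pvCountA_eq (l : List Int) :
    (PySem.List.pyRange 0 (l.length : Int) 1).foldl
      (fun c i => if PySem.List.pyGetD l i 0 ≠ 0 then c + 2 ^ i.toNat else c) 0
      = pvVal l := by
  rw [PySem.List.pyRange_one 0 (l.length : Int), List.foldl_map]
  simp only [zero_add, sub_zero, Int.toNat_natCast]
  have step : (List.range l.length).foldl
      (fun c k => if PySem.List.pyGetD l ((k : Nat) : Int) 0 ≠ 0 then c + 2 ^ k else c) 0
      = (List.range l.length).foldl
      (fun (c : Int) k => if l.getD k 0 ≠ 0 then c + 2 ^ (k + 0) else c) 0 := by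
    apply PySem.List.foldl_congr_mem
    intro a k hk
    rw [PySem.List.pyGetD_natCast]
    simp
  exact step.trans ((pvCountA_gen l 0 0).trans (by ring))

-- every integer is below 6^(e + n.toNat + 1)  (fuel bound for the counting loop)
theorem pvFuelBound (n : Int) (e : Nat) : n < (6:Int) ^ (e + (n.toNat + 1)) := by
  have h1 : n ≤ (n.toNat : Int) := Int.self_le_toNat n
  have h2 : n.toNat < 6 ^ (n.toNat + 1) := by
    calc n.toNat < 2 ^ n.toNat := Nat.lt_two_pow_self
    _ ≤ 6 ^ n.toNat := Nat.pow_le_pow_left (by norm_num) _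
    _ ≤ 6 ^ (n.toNat + 1) := Nat.pow_le_pow_right (by norm_num) (Nat.le_succ _)
  have h2' : (n.toNat : Int) < (6:Int) ^ (n.toNat + 1) := by exact_mod_cast h2
  have h3 : (6:Int) ^ (n.toNat + 1) ≤ 6 ^ (e + (n.toNat + 1)) :=
    pow_le_pow_right₀ (by norm_num) (by omega)
  exact lt_of_le_of_lt h1 (lt_of_lt_of_le h2' h3)

theorem pvCD_add_aux (f : Nat) : ∀ (n : Int) (e : Nat), n < (6:Int) ^ (e + f) →
    ∀ k, pvCountDigits n e k = k + pvCountDigits n e 0 := by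
  induction f with
  | zero =>
    intro n e hb k
    simp only [Nat.add_zero] at hb
    rw [pvCountDigits, dif_neg (show ¬((6:Int) ^ e ≤ n) by omega)]
    rw [pvCountDigits, dif_neg (show ¬((6:Int) ^ e ≤ n) by omega)]
    omega
  | succ f ih =>
    intro n e hb k
    by_cases h : (6:Int) ^ e ≤ n
    · rw [pvCountDigits, dif_pos h]
      conv_rhs => rw [pvCountDigits, dif_pos h]
      have hb' : n < (6:Int) ^ (e + 1 + f) := by
        have : e + 1 + f = e + (f + 1) := by omega
        rw [this]; exact hb
      rw [ih n (e + 1) hb' (k + 1), ih n (e + 1) hb' (0 + 1)]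
      omega
    · rw [pvCountDigits, dif_neg h]
      rw [pvCountDigits, dif_neg h]
      omega

theorem pvCD_add (n : Int) (e : Nat) (k : Int) :
    pvCountDigits n e k = k + pvCountDigits n e 0 :=
  pvCD_add_aux (n.toNat + 1) n e (pvFuelBound n e) k

theorem pvCD_nonneg_aux (f : Nat) : ∀ (n : Int) (e : Nat), n < (6:Int) ^ (e + f) →
    ∀ k, k ≤ pvCountDigits n e k := by
  induction f with
  | zero =>
    intro n e hb k
    simp only [Nat.add_zero] at hb
    rw [pvCountDigits, dif_neg (show ¬((6:Int) ^ e ≤ n) by omega)]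
  | succ f ih =>
    intro n e hb k
    by_cases h : (6:Int) ^ e ≤ n
    · rw [pvCountDigits, dif_pos h]
      have hb' : n < (6:Int) ^ (e + 1 + f) := by
        have : e + 1 + f = e + (f + 1) := by omega
        rw [this]; exact hb
      have := ih n (e + 1) hb' (k + 1)
      omega
    · rw [pvCountDigits, dif_neg h]

theorem pvCD_nonneg (n : Int) (e : Nat) (k : Int) : k ≤ pvCountDigits n e k :=
  pvCD_nonneg_aux (n.toNat + 1) n e (pvFuelBound n e) k

-- shifting the exponent by one equals dividing n by 6 (for nonnegative n)
theorem pvCD_shift_aux (f : Nat) : ∀ (n : Int) (e : Nat), 0 ≤ n → n < (6:Int) ^ (e + f) →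
    ∀ k, pvCountDigits n (e + 1) k = pvCountDigits (n / 6) e k := by
  induction f with
  | zero =>
    intro n e hn hb k
    have hiff : ((6:Int) ^ e ≤ n / 6) ↔ ((6:Int) ^ (e + 1) ≤ n) := by
      rw [Int.le_ediv_iff_mul_le (by norm_num : (0:Int) < 6)]
      constructor <;> intro h <;> [skip; skip] <;>
        · have : (6:Int) ^ (e + 1) = 6 ^ e * 6 := by ring
          omega
    have h6 : (6:Int) ^ e ≤ (6:Int) ^ (e + 1) :=
      pow_le_pow_right₀ (by norm_num) (Nat.le_succ _)
    simp only [Nat.add_zero] at hb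
    rw [pvCountDigits, dif_neg (show ¬((6:Int) ^ (e + 1) ≤ n) by omega)]
    rw [pvCountDigits, dif_neg (show ¬((6:Int) ^ e ≤ n / 6) by rw [hiff]; omega)]
  | succ f ih =>
    intro n e hn hb k
    have hiff : ((6:Int) ^ e ≤ n / 6) ↔ ((6:Int) ^ (e + 1) ≤ n) := by
      rw [Int.le_ediv_iff_mul_le (by norm_num : (0:Int) < 6)]
      constructor <;> intro h <;>
        · have : (6:Int) ^ (e + 1) = 6 ^ e * 6 := by ring
          omega
    by_cases h : (6:Int) ^ (e + 1) ≤ n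
    · rw [pvCountDigits, dif_pos h]
      conv_rhs => rw [pvCountDigits, dif_pos (hiff.mpr h)]
      have hb' : n < (6:Int) ^ (e + 1 + f) := by
        have : e + 1 + f = e + (f + 1) := by omega
        rw [this]; exact hb
      exact ih n (e + 1) hn hb' (k + 1)
    · rw [pvCountDigits, dif_neg h]
      rw [pvCountDigits, dif_neg (fun hc => h (hiff.mp hc))]

theorem pvCD_shift (n : Int) (hn : 0 ≤ n) (k : Int) :
    pvCountDigits n 1 k = pvCountDigits (n / 6) 0 k :=
  pvCD_shift_aux (n.toNat + 1) n 0 hn (pvFuelBound n 0) k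

-- A's append loop equals B's staged construction (count digits, then map the formula)
theorem pvLoopA_eq_map : ∀ (m : Nat) (n : Int), n.toNat ≤ m → ∀ acc,
    pvLoopA n acc = acc ++ (List.range (pvCountDigits n 0 0).toNat).map
      (fun j => n / 6 ^ j % 6) := by
  intro m
  induction m with
  | zero =>
    intro n hn acc
    rw [pvLoopA, dif_neg (by omega)]
    rw [pvCountDigits, dif_neg (by simp; omega)]
    simp
  | succ m ih =>
    intro n hn acc
    by_cases h : 0 < n
    · rw [pvLoopA, dif_pos h]
      rw [PySem.Int.floordiv_eq_ediv_of_pos (by norm_num : (0:Int) < 6),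
          PySem.Int.mod_eq_emod_of_pos (by norm_num : (0:Int) < 6)]
      have hd := Int.mul_ediv_add_emod n 6
      have hm1 : 0 ≤ n % 6 := Int.emod_nonneg n (by norm_num)
      have hm2 : n % 6 < 6 := Int.emod_lt_of_pos n (by norm_num)
      have hdnn : 0 ≤ n / 6 := by omega
      rw [ih (n / 6) (by omega) (acc ++ [n % 6])]
      have hg : pvCountDigits n 0 0 = 1 + pvCountDigits (n / 6) 0 0 := by
        rw [pvCountDigits, dif_pos (by simp; omega)]
        rw [pvCD_add n 1 (0 + 1), pvCD_shift n (le_of_lt h) 0]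
        omega
      have hgnn : (0:Int) ≤ pvCountDigits (n / 6) 0 0 := pvCD_nonneg _ _ _
      have ht : (pvCountDigits n 0 0).toNat = (pvCountDigits (n / 6) 0 0).toNat + 1 := by
        omega
      rw [ht, List.range_succ_eq_map, List.map_cons, List.map_map]
      have hf : ∀ j : Nat, n / 6 / 6 ^ j % 6 = n / 6 ^ (j + 1) % 6 := by
        intro j
        rw [Int.ediv_ediv_of_nonneg (by norm_num : (0:Int) ≤ 6), ← pow_succ']
      simp only [Function.comp_def, Nat.succ_eq_add_one, hf, pow_zero, Int.ediv_one]
      simp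
    · rw [pvLoopA, dif_neg h]
      rw [pvCountDigits, dif_neg (by simp; omega)]
      simp

-- bridge: B's pyRange comprehension equals the List.range map used above
theorem pvMapRange (n g : Int) :
    (PySem.List.pyRange 0 g 1).map
      (fun j => PySem.Int.mod (PySem.Int.floordiv n ((6:Int) ^ j.toNat)) 6)
      = (List.range g.toNat).map (fun j => n / 6 ^ j % 6) := by
  rw [PySem.List.pyRange_one, List.map_map]
  simp only [sub_zero]
  apply List.map_congr_left
  intro k hk
  simp only [Function.comp_def, zero_add, Int.toNat_natCast]
  rw [PySem.Int.floordiv_eq_ediv_of_pos (by positivity),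
      PySem.Int.mod_eq_emod_of_pos (by norm_num)]

-- ===== VERDICT (by name: the statement is the Claim_ definition above) =====
theorem getBaseTen_spec : Claim_equal_getBaseTen := by
  intro l _
  unfold Spec_getBaseTen getBaseTen getBaseTen_alt
  rw [pvCountA_eq, pvHorner]
  simp only [zero_mul, zero_add]
  rw [pvMapRange, pvLoopA_eq_map (pvVal l).toNat (pvVal l) le_rfl]
  simp
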